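-- pv_equiv track=rewrite | github.com/durachm/plotter_modulation | bmp_generator.py | check_list_for_equals
-- ===== SOURCE A (Python) =====
-- def check_list_for_equals(lst, index=0):
--     # if ele is None, assign the first element of the list to ele
--
--     ele = lst[index]
--     # base case: if index is equal to the length of the list, return True
--     if index == len(lst) -1:
--         return index, ele
--     # if the current element at index is not equal to ele, return False
--     elif lst[index] != lst[index+1]:
--         return index, ele
--     # otherwise, call the function again with the next index
--     else:
--         return check_list_for_equals(lst, index+1)
-- ===== SOURCE B (Python) =====
-- def check_list_for_equals(lst, index=0):
--     # iterative version of the same scan: same IndexError on bad index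
--     ele = lst[index]
--     while index != len(lst) - 1:
--         if lst[index] != lst[index + 1]:
--             return index, lst[index]
--         index += 1
--     return index, lst[index]
-- ===== Notes on version B (the rewrite author's own statement) =====
-- stated objective: idiomatic
-- what changed: Replaces the tail recursion with an explicit while-loop over the index (same O(n) scan, no recursion depth limit).
import Mathlib
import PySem

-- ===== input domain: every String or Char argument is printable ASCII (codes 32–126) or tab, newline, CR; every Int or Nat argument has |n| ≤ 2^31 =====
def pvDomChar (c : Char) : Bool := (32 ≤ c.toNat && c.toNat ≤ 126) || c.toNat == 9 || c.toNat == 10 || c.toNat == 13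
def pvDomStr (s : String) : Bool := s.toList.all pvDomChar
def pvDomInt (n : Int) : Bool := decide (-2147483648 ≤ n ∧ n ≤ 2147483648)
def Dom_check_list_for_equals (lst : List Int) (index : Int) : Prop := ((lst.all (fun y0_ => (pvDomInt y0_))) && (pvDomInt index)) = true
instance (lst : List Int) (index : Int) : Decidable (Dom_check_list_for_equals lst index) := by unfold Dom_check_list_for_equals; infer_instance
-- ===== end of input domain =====

-- B replaces A's tail recursion by an explicit while-loop over the index (same O(n) scan); equivalence is about the return value.

-- ===== PORT A =====
-- A: recursive scan.  'ele = lst[index]' raises outside Pre_; here pyGet? = none, junk value (0,0), excluded by Pre_.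
def check_list_for_equals (lst : List Int) (index : Int) : Int × Int :=
  match h : PySem.List.pyGet? lst index with
  | none => (0, 0)
  | some ele =>
    if index = (lst.length : Int) - 1 then (index, ele)
    else if PySem.List.pyGet? lst index ≠ PySem.List.pyGet? lst (index + 1) then (index, ele)
    else check_list_for_equals lst (index + 1)
termination_by ((lst.length : Int) - index).toNat
decreasing_by
  have := PySem.List.pyGet?_eq_none_iff (xs := lst) (i := index)
  simp [h] at this
  unfold PySem.Raise.InRange at this
  omega

-- ===== PORT B =====
-- the while-loop of Source B; 'lst[index]' accesses inside the loop body/final return via pyGet? (none = IndexError, junk, excluded by Pre_)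
def clfeLoop (lst : List Int) (index : Int) : Int × Int :=
  if index = (lst.length : Int) - 1 then
    (index, (PySem.List.pyGet? lst index).getD 0)
  else
    match h : PySem.List.pyGet? lst index, PySem.List.pyGet? lst (index + 1) with
    | some a, some b => if a ≠ b then (index, a) else clfeLoop lst (index + 1)
    | _, _ => (0, 0)
termination_by ((lst.length : Int) - index).toNat
decreasing_by
  have := PySem.List.pyGet?_eq_none_iff (xs := lst) (i := index)
  simp [h] at this
  unfold PySem.Raise.InRange at this
  omega

def check_list_for_equals_alt (lst : List Int) (index : Int) : Int × Int :=
  match PySem.List.pyGet? lst index with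
  | none => (0, 0)          -- 'ele = lst[index]' raises: outside Pre_
  | some _ => clfeLoop lst index

-- ===== PRECONDITION & SPEC =====
-- Pre_ : exactly the inputs where Python A returns normally (initial lst[index] in range, incl. negative wraparound)
def Pre_check_list_for_equals (lst : List Int) (index : Int) : Prop :=
  -(lst.length : Int) ≤ index ∧ index < (lst.length : Int)
instance (lst : List Int) (index : Int) : Decidable (Pre_check_list_for_equals lst index) := by
  unfold Pre_check_list_for_equals; infer_instance
def pvWitness_check_list_for_equals : List Int × Int := ([3, 3, 5], 0)

def Spec_check_list_for_equals (lst : List Int) (index : Int) (out : Int × Int) : Prop := out = check_list_for_equals_alt lst index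
instance (lst : List Int) (index : Int) (out : Int × Int) : Decidable (Spec_check_list_for_equals lst index out) := by unfold Spec_check_list_for_equals; infer_instance

-- ===== CLAIM (what is proved, stated in full; the proofs are below) =====
def Claim_equal_check_list_for_equals : Prop := ∀ (lst : List Int) (index : Int), Dom_check_list_for_equals lst index → Pre_check_list_for_equals lst index → Spec_check_list_for_equals lst index (check_list_for_equals lst index)

-- ===== LEMMAS AND PROOFS =====

theorem pyGet?_some_of_inrange (lst : List Int) (i : Int)
    (h1 : -(lst.length : Int) ≤ i) (h2 : i < (lst.length : Int)) :
    ∃ a, PySem.List.pyGet? lst i = some a := by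
  cases h : PySem.List.pyGet? lst i with
  | some a => exact ⟨a, rfl⟩
  | none =>
    have := (PySem.List.pyGet?_eq_none_iff (xs := lst) (i := i)).mp h
    unfold PySem.Raise.InRange at this
    omega

theorem clfe_eq (lst : List Int) (index : Int)
    (h1 : -(lst.length : Int) ≤ index) (h2 : index < (lst.length : Int)) :
    check_list_for_equals lst index = clfeLoop lst index := by
  generalize hk : ((lst.length : Int) - index).toNat = k
  induction k generalizing index with
  | zero => omega
  | succ k ih =>
    obtain ⟨a, ha⟩ := pyGet?_some_of_inrange lst index h1 h2
    rw [check_list_for_equals, clfeLoop, ha]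
    by_cases hend : index = (lst.length : Int) - 1
    · simp [hend]
    · simp only [if_neg hend]
      have h2' : index + 1 < (lst.length : Int) := by omega
      obtain ⟨b, hb⟩ := pyGet?_some_of_inrange lst (index + 1) (by omega) h2'
      rw [hb]
      by_cases hne : a = b
      · subst hne
        simp only [ne_eq, not_true_eq_false, if_false]
        exact ih (index + 1) (by omega) h2' (by omega)
      · simp [hne]

-- ===== VERDICT (by name: the statement is the Claim_ definition above) =====
theorem check_list_for_equals_spec : Claim_equal_check_list_for_equals := by
  intro lst index _ hpre
  obtain ⟨h1, h2⟩ := hpre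
  unfold Spec_check_list_for_equals check_list_for_equals_alt
  obtain ⟨a, ha⟩ := pyGet?_some_of_inrange lst index h1 h2
  rw [ha]
  exact clfe_eq lst index h1 h2
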